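-- pv_equiv track=rewrite | github.com/thirdeye18/discordBot | dieRoller.py | rollFormatter
-- ===== SOURCE A (Python) =====
-- def rollFormatter(command):
--     roll = []
--     formatted_roll = []
--     ## strip apart the string to get just the qty and side for the dice
--     ## command enters as a string, will convert into list to parse
--     for i in list(command.lower()):
--         if i.isnumeric():    # discard ! and roll portion of string
--             roll.append(i)  # roll list is numbers and a 'd' in the middle
--         elif i == 'd':
--             roll.append(i)
--     ## join the list into a string, then split at the 'd' into 2 list items
--     formatted_roll = "".join(roll).split("d")
--     ## now the 2 list items can be split off to variables
--     return formatted_roll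
-- ===== SOURCE B (Python) =====
-- def rollFormatter(command):
--     result = [""]
--     for ch in command.lower():
--         if ch.isdigit():
--             result[-1] += ch
--         elif ch == 'd':
--             result.append("")
--     return result
-- ===== Notes on version B (the rewrite author's own statement) =====
-- stated objective: simpler
-- what changed: Replaces A's filter-into-list + join + split('d') pipeline with a single pass that builds the partitioned groups directly (append digit to last group, start a new group on 'd').
import Mathlib
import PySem

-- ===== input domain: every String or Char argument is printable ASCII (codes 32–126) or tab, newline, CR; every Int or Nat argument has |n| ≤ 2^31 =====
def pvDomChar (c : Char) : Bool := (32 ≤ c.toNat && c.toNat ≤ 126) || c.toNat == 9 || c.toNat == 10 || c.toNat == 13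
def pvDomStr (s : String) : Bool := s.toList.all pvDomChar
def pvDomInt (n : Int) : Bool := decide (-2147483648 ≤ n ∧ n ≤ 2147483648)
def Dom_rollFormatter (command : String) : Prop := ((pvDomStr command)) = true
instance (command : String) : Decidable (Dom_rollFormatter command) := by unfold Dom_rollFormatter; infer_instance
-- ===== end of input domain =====

-- B replaces A's filter→join→split('d') pipeline with one pass building the groups directly (simpler decomposition, same O(n) cost).
-- ===== PORT A =====
-- i.isnumeric() is ported as Chars.isdigit: exact on the ASCII domain Dom_ states.
def rollFormatter (command : String) : List String :=
  let roll : List Char :=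
    (PySem.Str.lower command).toList.foldl
      (fun acc i =>
        if PySem.Chars.isdigit i then acc ++ [i]
        else if i = 'd' then acc ++ [i]
        else acc) []
  (PySem.Chars.splitOn roll ['d']).map String.ofList

-- ===== PORT B =====
-- state = (finished groups, current last group); result[-1] += ch / result.append("")
def rollFormatter_alt (command : String) : List String :=
  let st :=
    (PySem.Str.lower command).toList.foldl
      (fun (st : List (List Char) × List Char) ch =>
        if PySem.Chars.isdigit ch then (st.1, st.2 ++ [ch])
        else if ch = 'd' then (st.1 ++ [st.2], [])
        else st) ([], [])
  (st.1 ++ [st.2]).map String.ofList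

-- ===== PRECONDITION & SPEC =====
def Spec_rollFormatter (command : String) (out : List String) : Prop := out = rollFormatter_alt command
instance (command : String) (out : List String) : Decidable (Spec_rollFormatter command out) := by unfold Spec_rollFormatter; infer_instance

-- ===== CLAIM (what is proved, stated in full; the proofs are below) =====
def Claim_equal_rollFormatter : Prop := ∀ (command : String), Dom_rollFormatter command → Spec_rollFormatter command (rollFormatter command)

-- ===== LEMMAS AND PROOFS =====

def pvKeep (c : Char) : Bool := PySem.Chars.isdigit c || c = 'd'

def pvBStep (st : List (List Char) × List Char) (ch : Char) : List (List Char) × List Char :=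
  if PySem.Chars.isdigit ch then (st.1, st.2 ++ [ch])
  else if ch = 'd' then (st.1 ++ [st.2], [])
  else st

-- A's filter loop collects exactly the kept characters
theorem pvRoll_eq_filter (l : List Char) :
    l.foldl (fun acc i =>
        if PySem.Chars.isdigit i then acc ++ [i]
        else if i = 'd' then acc ++ [i]
        else acc) [] = l.filter pvKeep := by
  have h : (fun (acc : List Char) i =>
      if PySem.Chars.isdigit i then acc ++ [i]
      else if i = 'd' then acc ++ [i]
      else acc) = fun acc i => if pvKeep i then acc ++ [i] else acc := by
    funext acc i
    by_cases h1 : PySem.Chars.isdigit i <;> by_cases h2 : i = 'd' <;>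
      simp [pvKeep, h1, h2]
  rw [h, PySem.List.foldl_append_if]
  simp

-- B's fold ignores characters it does not keep
theorem pvBFold_filter (l : List Char) (st : List (List Char) × List Char) :
    l.foldl pvBStep st = (l.filter pvKeep).foldl pvBStep st := by
  induction l generalizing st with
  | nil => rfl
  | cons c rest ih =>
    by_cases h1 : PySem.Chars.isdigit c
    · simp [List.filter, pvKeep, h1, List.foldl_cons, ih]
    · by_cases h2 : c = 'd'
      · simp [List.filter, pvKeep, h2, List.foldl_cons, ih]
      · simp only [List.foldl_cons, List.filter]
        have : pvKeep c = false := by simp [pvKeep, h1, h2]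
        rw [this]
        have : pvBStep st c = st := by simp [pvBStep, h1, h2]
        rw [this, ih]

-- splitOn's worker on a list of kept characters equals B's fold
theorem pvGo_eq_fold (fuel : Nat) (l : List Char) (hf : l.length < fuel)
    (hk : ∀ c ∈ l, pvKeep c = true) (done : List (List Char)) (cur : List Char) :
    PySem.Chars.splitOn.go ['d'] fuel l cur.reverse done.reverse =
      (l.foldl pvBStep (done, cur)).1 ++ [(l.foldl pvBStep (done, cur)).2] := by
  induction fuel generalizing l done cur with
  | zero => omega
  | succ n ih =>
    cases l with
    | nil =>
      simp [PySem.Chars.splitOn.go]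
    | cons c rest =>
      have hc := hk c (by simp)
      have hrest : ∀ x ∈ rest, pvKeep x = true := fun x hx => hk x (by simp [hx])
      have hlen : rest.length < n := by simpa using hf
      by_cases h2 : c = 'd'
      · have hpre : List.isPrefixOf ['d'] (c :: rest) = true := by
          subst h2; simp [List.isPrefixOf]
        rw [PySem.Chars.splitOn.go]
        simp only [hpre, if_true, List.length_cons, List.length_nil, Nat.zero_add,
          List.drop_succ_cons, List.drop_zero, List.reverse_reverse]
        have e2 : cur :: done.reverse = (done ++ [cur]).reverse := by simp
        rw [e2]
        have := ih rest hlen hrest (done ++ [cur]) []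
        simp only [List.reverse_nil] at this
        rw [this]
        have hd : PySem.Chars.isdigit 'd' = false := by decide
        simp [pvBStep, hd, h2]
      · have hd : PySem.Chars.isdigit c = true := by
          have hc' : PySem.Chars.isdigit c = true ∨ c = 'd' := by simpa [pvKeep] using hc
          rcases hc' with h | h
          · exact h
          · exact absurd h h2
        have hpre : List.isPrefixOf ['d'] (c :: rest) = false := by
          simp [List.isPrefixOf]
          exact fun h => absurd h.symm h2
        rw [PySem.Chars.splitOn.go]
        simp only [hpre, Bool.false_eq_true, if_false]
        have e2 : c :: cur.reverse = (cur ++ [c]).reverse := by simp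
        rw [e2]
        rw [ih rest hlen hrest done (cur ++ [c])]
        simp [pvBStep, hd]

-- ===== VERDICT (by name: the statement is the Claim_ definition above) =====
theorem rollFormatter_spec : Claim_equal_rollFormatter := by
  intro command _
  unfold Spec_rollFormatter rollFormatter rollFormatter_alt
  simp only []
  rw [pvRoll_eq_filter]
  have hb : (fun (st : List (List Char) × List Char) ch =>
      if PySem.Chars.isdigit ch = true then (st.1, st.2 ++ [ch])
      else if ch = 'd' then (st.1 ++ [st.2], []) else st) = pvBStep := by
    funext st ch; simp [pvBStep]
  rw [hb, pvBFold_filter]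
  congr 1
  have hk : ∀ c ∈ (PySem.Str.lower command).toList.filter pvKeep, pvKeep c = true := by
    intro c hc; exact (List.mem_filter.mp hc).2
  have h := pvGo_eq_fold (((PySem.Str.lower command).toList.filter pvKeep).length + 1)
      ((PySem.Str.lower command).toList.filter pvKeep) (by omega) hk [] []
  simp only [List.reverse_nil] at h
  unfold PySem.Chars.splitOn
  rw [h]
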